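-- pv_equiv track=rewrite | github.com/gwwang16/f1tenth_gym_ros | scripts/reactive_gap_follow.py | find_max_gap
-- ===== SOURCE A (Python) =====
-- def find_max_gap(free_space_ranges):
--     """ Return the start index & end index of the max gap in free_space_ranges
--     """
--     size, max_size, max_start, max_end = 0, 0, 0, 0
--     for i in range(len(free_space_ranges)):
--         if free_space_ranges[i] != 0:
--             size += 1
--         else:
--             size = 0
--
--         if size > max_size:
--             max_size = size
--             max_end = i
--
--     max_start = max_end - max_size
--
--     return max_start, max_end + 1
-- ===== SOURCE B (Python) =====
-- def find_max_gap(free_space_ranges):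
--     """Run-skipping rewrite: jump over each maximal nonzero run at once
--     instead of counting element by element (same result as A, including
--     its start-index convention and the (0, 1) answer for all-zero input)."""
--     best_len, best_end = 0, 0
--     i, n = 0, len(free_space_ranges)
--     while i < n:
--         if free_space_ranges[i] == 0:
--             i += 1
--             continue
--         j = i
--         while j < n and free_space_ranges[j] != 0:
--             j += 1
--         run = j - i
--         if run > best_len:
--             best_len, best_end = run, j - 1
--         i = j
--     return best_end - best_len, best_end + 1
-- ===== Notes on version B (the rewrite author's own statement) =====
-- stated objective: alternative
-- what changed: Replaces A's per-element run-counter fold (size/max_size/max_end updated at every index) with a run-skipping two-level scan that segments the list into maximal nonzero runs and compares each whole run's length against the best once.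
import Mathlib
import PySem

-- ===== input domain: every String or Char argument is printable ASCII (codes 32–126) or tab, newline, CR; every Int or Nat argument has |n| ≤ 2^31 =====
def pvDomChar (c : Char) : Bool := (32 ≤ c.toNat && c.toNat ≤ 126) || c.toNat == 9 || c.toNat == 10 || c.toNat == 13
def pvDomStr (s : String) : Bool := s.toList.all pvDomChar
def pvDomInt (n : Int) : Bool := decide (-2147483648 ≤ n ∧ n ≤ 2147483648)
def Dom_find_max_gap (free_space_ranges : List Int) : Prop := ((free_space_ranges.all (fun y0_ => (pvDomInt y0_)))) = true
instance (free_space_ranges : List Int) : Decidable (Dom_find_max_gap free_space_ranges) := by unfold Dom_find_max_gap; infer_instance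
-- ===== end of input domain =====

-- B replaces A's per-element run-counter fold with a run-skipping two-level scan over maximal nonzero runs (alternative decomposition, same cost).


-- ===== PORT A =====
-- A: one fold over the indexed elements carrying (size, max_size, max_end).
def find_max_gap (free_space_ranges : List Int) : Int × Int :=
  let st := free_space_ranges.zipIdx.foldl
    (fun (st : Int × Int × Int) (p : Int × Nat) =>
      let size := if p.1 ≠ 0 then st.1 + 1 else 0
      if size > st.2.1 then (size, size, (p.2 : Int)) else (size, st.2.1, st.2.2))
    (0, 0, 0)
  (st.2.2 - st.2.1, st.2.2 + 1)

-- ===== PORT B =====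
-- length of the maximal nonzero prefix (B's inner `while j < n and ... != 0` scan)
def pvRunLen : List Int → Nat
  | [] => 0
  | x :: r => if x ≠ 0 then pvRunLen r + 1 else 0

-- B's outer while loop: skip zeros one at a time; on a nonzero head measure the
-- whole run, compare it against the best once, and jump past it.
def pvAltGo : List Int → Int → Int → Int → Int × Int
  | [], _, bestLen, bestEnd => (bestLen, bestEnd)
  | x :: rest, i, bestLen, bestEnd =>
    if x = 0 then pvAltGo rest (i + 1) bestLen bestEnd
    else
      let run : Int := (pvRunLen rest : Int) + 1
      let rest' := rest.drop (pvRunLen rest)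
      if run > bestLen then pvAltGo rest' (i + run) run (i + run - 1)
      else pvAltGo rest' (i + run) bestLen bestEnd
termination_by xs _ _ _ => xs.length
decreasing_by
  · simp
  · simp only [List.length_cons, List.length_drop]; omega
  · simp only [List.length_cons, List.length_drop]; omega

def find_max_gap_alt (free_space_ranges : List Int) : Int × Int :=
  let bl_be := pvAltGo free_space_ranges 0 0 0
  (bl_be.2 - bl_be.1, bl_be.2 + 1)

-- ===== PRECONDITION & SPEC =====
def Spec_find_max_gap (free_space_ranges : List Int) (out : Int × Int) : Prop := out = find_max_gap_alt free_space_ranges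
instance (free_space_ranges : List Int) (out : Int × Int) : Decidable (Spec_find_max_gap free_space_ranges out) := by unfold Spec_find_max_gap; infer_instance

-- ===== CLAIM (what is proved, stated in full; the proofs are below) =====
def Claim_equal_find_max_gap : Prop := ∀ (free_space_ranges : List Int), Dom_find_max_gap free_space_ranges → Spec_find_max_gap free_space_ranges (find_max_gap free_space_ranges)

-- ===== LEMMAS AND PROOFS =====

-- recursive form of A's fold over the indexed list (proof helper)
def pvGoA : List Int → Int → Int × Int × Int → Int × Int × Int
  | [], _, st => st
  | x :: r, i, st =>
    let size := if x ≠ 0 then st.1 + 1 else 0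
    pvGoA r (i + 1) (if size > st.2.1 then (size, size, i) else (size, st.2.1, st.2.2))

theorem pvFoldA (xs : List Int) : ∀ (n : Nat) (st : Int × Int × Int),
    (xs.zipIdx n).foldl
      (fun (st : Int × Int × Int) (p : Int × Nat) =>
        let size := if p.1 ≠ 0 then st.1 + 1 else 0
        if size > st.2.1 then (size, size, (p.2 : Int)) else (size, st.2.1, st.2.2)) st
    = pvGoA xs (n : Int) st := by
  induction xs with
  | nil => intro n st; simp [pvGoA]
  | cons x r ih =>
    intro n st
    rw [List.zipIdx_cons, List.foldl_cons, ih, pvGoA]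
    push_cast
    rfl

theorem pvDropHead (xs : List Int) : ∀ y t, xs.drop (pvRunLen xs) = y :: t → y = 0 := by
  induction xs with
  | nil => intro y t h; simp at h
  | cons x r ih =>
    intro y t h
    by_cases hx : x = 0
    · simp [pvRunLen, hx] at h
      tauto
    · simp only [pvRunLen, if_pos hx, List.drop_succ_cons] at h
      exact ih y t h

theorem pvRunStep (xs : List Int) : ∀ (i s m0 e0 : Int),
    pvGoA xs i (s, (if m0 < s then s else m0), (if m0 < s then i - 1 else e0))
    = pvGoA (xs.drop (pvRunLen xs)) (i + (pvRunLen xs : Int))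
        (s + (pvRunLen xs : Int),
         (if m0 < s + (pvRunLen xs : Int) then s + (pvRunLen xs : Int) else m0),
         (if m0 < s + (pvRunLen xs : Int) then i + (pvRunLen xs : Int) - 1 else e0)) := by
  induction xs with
  | nil => intro i s m0 e0; simp [pvRunLen]
  | cons x r ih =>
    intro i s m0 e0
    by_cases hx : x = 0
    · simp [pvRunLen, hx]
    · simp only [pvRunLen, if_pos hx, List.drop_succ_cons]
      rw [pvGoA]
      simp only [hx, if_pos, gt_iff_lt, ne_eq, not_false_eq_true]
      have h1 : (if (if m0 < s then s else m0) < s + 1 then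
            ((s + 1 : Int), (s + 1 : Int), i)
          else ((s + 1 : Int), (if m0 < s then s else m0), (if m0 < s then i - 1 else e0)))
          = ((s + 1 : Int), (if m0 < s + 1 then s + 1 else m0),
             (if m0 < s + 1 then (i + 1) - 1 else e0)) := by
        split_ifs <;> simp_all
        omega
      rw [h1, ih (i + 1) (s + 1) m0 e0]
      have hc : ((pvRunLen r + 1 : Nat) : Int) = (pvRunLen r : Int) + 1 := by push_cast; ring
      rw [hc]
      have e1 : i + 1 + (pvRunLen r : Int) = i + ((pvRunLen r : Int) + 1) := by ring
      have e2 : s + 1 + (pvRunLen r : Int) = s + ((pvRunLen r : Int) + 1) := by ring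
      rw [e1, e2]

theorem pvMain : ∀ (n : Nat) (xs : List Int), xs.length ≤ n → ∀ (i m e : Int), 0 ≤ m →
    (pvGoA xs i (0, m, e)).2 = pvAltGo xs i m e := by
  intro n
  induction n with
  | zero =>
    intro xs hlen i m e _
    have : xs = [] := List.length_eq_zero_iff.mp (Nat.le_zero.mp hlen)
    subst this
    simp [pvGoA, pvAltGo]
  | succ n ih =>
    intro xs hlen i m e hm
    cases xs with
    | nil => simp [pvGoA, pvAltGo]
    | cons x r =>
      by_cases hx : x = 0
      · rw [pvGoA, pvAltGo]
        simp only [hx, ne_eq, not_true_eq_false, if_false, if_true, gt_iff_lt]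
        have : ¬ ((0 : Int) > m) := by omega
        simp only [gt_iff_lt, if_neg (by omega : ¬ (m < 0))] at *
        rw [ih r (by simpa using Nat.le_of_succ_le_succ hlen) (i + 1) m e hm]
      · rw [pvGoA, pvAltGo]
        simp only [hx, ne_eq, not_false_eq_true, if_true, gt_iff_lt, zero_add]
        -- A's first step of the run puts the state into pvRunStep's shape with s = 1
        have hst : (if m < (1 : Int) then ((1 : Int), (1 : Int), i)
              else ((1 : Int), m, e))
            = ((1 : Int), (if m < 1 then 1 else m), (if m < 1 then (i + 1) - 1 else e)) := by
          split_ifs <;> simp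
        rw [hst, pvRunStep r (i + 1) 1 m e]
        set K : Int := (pvRunLen r : Int) with hK
        have hK0 : 0 ≤ K := by positivity
        have hMnn : 0 ≤ (if m < 1 + K then 1 + K else m) := by split_ifs <;> omega
        have harg1 : i + 1 + K = i + (K + 1) := by ring
        have harg2 : (1 : Int) + K = K + 1 := by ring
        -- case on what remains after the run
        cases hdrop : r.drop (pvRunLen r) with
        | nil =>
          simp only [pvAltGo, pvGoA, if_false]
          split_ifs <;> simp only [Prod.mk.injEq] <;> constructor <;> omega
        | cons y t =>
          have hy : y = 0 := pvDropHead r y t hdrop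
          subst hy
          rw [pvGoA]
          simp only [ne_eq, not_true_eq_false, if_false, gt_iff_lt,
            if_neg (show ¬ ((0:Int) > (if m < 1 + K then 1 + K else m)) by simp only [gt_iff_lt]; omega)]
          have htlen : t.length ≤ n := by
            have h1 : (r.drop (pvRunLen r)).length ≤ r.length := by
              simp [List.length_drop]
            have h2 : t.length + 1 = (r.drop (pvRunLen r)).length := by rw [hdrop]; simp
            have h3 : r.length ≤ n := by simpa using Nat.le_of_succ_le_succ hlen
            omega
          rw [ih t htlen (i + 1 + K + 1) _ _ hMnn]
          -- unfold B's zero-skipping step on the 0 :: t remainder, then align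
          simp only [pvAltGo]
          norm_num
          split_ifs <;> (try (congr 1 <;> omega))

-- ===== VERDICT (by name: the statement is the Claim_ definition above) =====
theorem find_max_gap_spec : Claim_equal_find_max_gap := by
  intro xs _
  unfold Spec_find_max_gap find_max_gap find_max_gap_alt
  have h := pvFoldA xs 0 (0, 0, 0)
  simp only [Nat.cast_zero] at h
  rw [show xs.zipIdx = xs.zipIdx 0 from rfl]
  have h2 := pvMain xs.length xs (le_refl _) 0 0 0 (le_refl _)
  simp only [h, ← h2]
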